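-- pv_equiv track=rewrite | github.com/zaehuun/Python-Algorithm | 프로그래머스/Level 2/124 나라의 숫자.py | solution
-- ===== SOURCE A (Python) =====
-- def solution(n):
--     answer = ''
--     while n:
--         a = n // 3
--         b = n % 3
--         if b == 0:
--             b = 4
--             n = n // 3 - 1
--         else:
--             n = n // 3
--
--         answer = str(b) + answer
--     return answer
-- ===== SOURCE B (Python) =====
-- def solution(n):
--     if n == 0:
--         return ''
--     return solution((n - 1) // 3) + '412'[n % 3]
-- ===== Notes on version B (the rewrite author's own statement) =====
-- stated objective: simpler
-- what changed: Replaces the while-loop with a prepend accumulator by a recursion on the unified recurrence n'=(n-1)//3 that appends a digit chosen from a 3-entry table by the remainder mod 3, building the string most-significant digit first by recursive descent.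
import Mathlib
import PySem

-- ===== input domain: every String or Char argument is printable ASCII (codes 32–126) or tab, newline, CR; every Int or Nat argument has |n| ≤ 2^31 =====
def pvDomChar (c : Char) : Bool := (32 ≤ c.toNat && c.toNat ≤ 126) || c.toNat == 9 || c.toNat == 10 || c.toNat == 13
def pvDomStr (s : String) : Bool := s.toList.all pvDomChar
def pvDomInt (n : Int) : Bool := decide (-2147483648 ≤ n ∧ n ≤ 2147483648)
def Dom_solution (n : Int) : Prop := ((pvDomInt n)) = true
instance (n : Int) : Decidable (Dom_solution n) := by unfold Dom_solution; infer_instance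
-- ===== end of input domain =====

-- B replaces A's while-loop/prepend accumulator by a recursion on n'=(n-1)//3 appending a table digit (objective: simpler).
-- ===== PORT A =====
-- A's while-loop, transliterated with fuel n.toNat (guard only for totality; sufficient on Pre_: n strictly decreases each iteration).
def solutionGo : Nat → Int → String → String
  | 0, _, answer => answer
  | f + 1, n, answer =>
    if n = 0 then answer
    else
      let b := PySem.Int.mod n 3
      if b = 0 then
        solutionGo f (PySem.Int.floordiv n 3 - 1) (PySem.Int.toStr 4 ++ answer)
      else
        solutionGo f (PySem.Int.floordiv n 3) (PySem.Int.toStr b ++ answer)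

def solution (n : Int) : String := solutionGo n.toNat n ""

-- ===== PORT B =====
-- table lookup '412'[n % 3]; the none branch is unreachable (the remainder is always in range).
def altDigit (n : Int) : String :=
  match PySem.Str.pyGet? "412" (PySem.Int.mod n 3) with
  | some c => String.ofList [c]
  | none => ""

-- B's recursion, with fuel n.toNat (guard only for totality; sufficient on Pre_).
def altGo : Nat → Int → String
  | 0, _ => ""
  | f + 1, n =>
    if n = 0 then ""
    else altGo f (PySem.Int.floordiv (n - 1) 3) ++ altDigit n

def solution_alt (n : Int) : String := altGo n.toNat n

-- ===== PRECONDITION & SPEC =====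
-- Pre_ excludes n < 0, on which Python A never returns (the while-loop diverges: n//3 stays negative).
def Pre_solution (n : Int) : Prop := 0 ≤ n
instance (n : Int) : Decidable (Pre_solution n) := by unfold Pre_solution; infer_instance
def pvWitness_solution : Int := (5)
def Spec_solution (n : Int) (out : String) : Prop := out = solution_alt n
instance (n : Int) (out : String) : Decidable (Spec_solution n out) := by unfold Spec_solution; infer_instance

-- ===== CLAIM (what is proved, stated in full; the proofs are below) =====
def Claim_equal_solution : Prop := ∀ (n : Int), Dom_solution n → Pre_solution n → Spec_solution n (solution n)

-- ===== LEMMAS AND PROOFS =====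

-- The two branch successors of A coincide with B's unified recurrence (n-1)//3.
theorem next_eq (n : Int) (hn : 0 < n) :
    (if PySem.Int.mod n 3 = 0 then PySem.Int.floordiv n 3 - 1 else PySem.Int.floordiv n 3)
      = PySem.Int.floordiv (n - 1) 3 := by
  have h3 : (0:Int) < 3 := by omega
  rw [PySem.Int.floordiv_eq_ediv_of_pos h3, PySem.Int.floordiv_eq_ediv_of_pos h3,
      PySem.Int.mod_eq_emod_of_pos h3]
  omega

theorem next_bounds (n : Int) (_hn : 0 < n) :
    0 ≤ PySem.Int.floordiv (n - 1) 3 ∧ PySem.Int.floordiv (n - 1) 3 < n := by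
  rw [PySem.Int.floordiv_eq_ediv_of_pos (by omega : (0:Int) < 3)]
  omega

-- A's emitted digit equals B's table digit.
theorem digit_eq (n : Int) :
    (if PySem.Int.mod n 3 = 0 then PySem.Int.toStr 4 else PySem.Int.toStr (PySem.Int.mod n 3))
      = altDigit n := by
  have hm : PySem.Int.mod n 3 = 0 ∨ PySem.Int.mod n 3 = 1 ∨ PySem.Int.mod n 3 = 2 := by
    rw [PySem.Int.mod_eq_emod_of_pos (by omega : (0:Int) < 3)]; omega
  unfold altDigit
  rcases hm with h | h | h <;> rw [h] <;> decide

theorem go_eq (f : Nat) : ∀ (n : Int) (answer : String), 0 ≤ n → n.toNat ≤ f →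
    solutionGo f n answer = altGo f n ++ answer := by
  induction f with
  | zero =>
    intro n answer h0 hf
    have hz : n = 0 := by omega
    subst hz
    simp [solutionGo, altGo]
  | succ f ih =>
    intro n answer h0 hf
    by_cases hz : n = 0
    · simp [hz, solutionGo, altGo]
    · have hn : 0 < n := by omega
      have hb := next_bounds n hn
      have hnext := next_eq n hn
      have hd := digit_eq n
      have hfle : (PySem.Int.floordiv (n - 1) 3).toNat ≤ f := by omega
      simp only [solutionGo, altGo, if_neg hz]
      by_cases hm : PySem.Int.mod n 3 = 0
      · rw [if_pos hm] at hnext hd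
        rw [if_pos hm, hnext, hd, ih _ _ hb.1 hfle, String.append_assoc]
      · rw [if_neg hm] at hnext hd
        rw [if_neg hm, hnext, hd, ih _ _ hb.1 hfle, String.append_assoc]

-- ===== VERDICT (by name: the statement is the Claim_ definition above) =====
theorem solution_spec : Claim_equal_solution := by
  intro n _ hpre
  unfold Spec_solution solution solution_alt
  rw [go_eq n.toNat n "" hpre (le_refl _)]
  simp
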